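-- pv_equiv track=rewrite | github.com/ftheberge/GraphMiningNotebooks | Python_Notebooks_2nd/simpliciality.py | max_subsets
-- ===== SOURCE A (Python) =====
-- from collections.abc import Sequence
-- import operator
-- from functools import reduce
--
-- def is_power_of_two(n):
--     return (n & (n - 1)) == 0
--
-- def max_subsets(E):
--     '''return list of max subsets of length 3+'''
--     if len(E) <= 1:
--         return list(E)
--     if not isinstance(E, Sequence):
--         E = list(E)
--     incidence = {}
--     for i, s in enumerate(E):
--         for element in s:
--             try:
--                 incidence[element] |= 1 << i
--             except KeyError:
--                 incidence[element] = 1 << i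
--     out = [s for s in E if s and len(s)>2 and
--            is_power_of_two(reduce(operator.and_, (incidence[x] for x in s)))]
--     return out
-- ===== SOURCE B (Python) =====
-- from collections.abc import Sequence
--
-- def max_subsets(E):
--     '''return list of max subsets of length 3+'''
--     if len(E) <= 1:
--         return list(E)
--     if not isinstance(E, Sequence):
--         E = list(E)
--     return [s for i, s in enumerate(E)
--             if s and len(s) > 2
--             and not any(j != i and set(s) <= set(t) for j, t in enumerate(E))]
-- ===== Notes on version B (the rewrite author's own statement) =====
-- stated objective: simpler
-- what changed: Drops the element->bitmask incidence index and the reduce/power-of-two test, deciding maximality of each size-3+ set by a direct nested scan checking that no other member of the family is a superset.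
import Mathlib
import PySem

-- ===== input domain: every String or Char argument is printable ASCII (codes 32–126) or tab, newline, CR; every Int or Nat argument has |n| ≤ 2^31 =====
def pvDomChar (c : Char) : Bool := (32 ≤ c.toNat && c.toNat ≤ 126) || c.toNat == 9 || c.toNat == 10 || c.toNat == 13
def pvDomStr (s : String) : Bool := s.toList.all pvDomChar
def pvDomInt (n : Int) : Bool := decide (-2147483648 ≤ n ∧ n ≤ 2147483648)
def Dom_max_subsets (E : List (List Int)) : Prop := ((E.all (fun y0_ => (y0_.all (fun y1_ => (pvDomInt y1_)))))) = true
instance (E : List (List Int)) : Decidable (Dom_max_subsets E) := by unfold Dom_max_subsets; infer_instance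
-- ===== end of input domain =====

-- B replaces A's incidence-bitmask indexing with a direct nested pairwise superset scan (alternative algorithm, same result).


-- ===== PORT A =====
-- is_power_of_two(n): (n & (n - 1)) == 0.  The masks are Python non-negative ints, ported as Nat
-- (for n = 0 Python gets 0 & -1 = 0 == 0 = True and Nat gets 0 &&& (0-1) = 0 == 0 = True: same value).
def pvIsPow2 (n : Nat) : Bool := (n &&& (n - 1)) == 0

-- inner loop 'for element in s: incidence[element] |= 1 << i' with its try/except KeyError
def pvIncStep (i : Nat) (d : PySem.Dict Int Nat) (s : List Int) : PySem.Dict Int Nat :=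
  s.foldl (fun d x =>
    match d.get? x with
    | some v => d.insert x (v ||| (1 <<< i))
    | none   => d.insert x (1 <<< i)) d

-- 'for i, s in enumerate(E): …'  (i ≥ 0 always, so .toNat is exact)
def pvIncidence (E : List (List Int)) : PySem.Dict Int Nat :=
  (PySem.List.enumerate E).foldl (fun d p => pvIncStep p.1.toNat d p.2) PySem.Dict.empty

-- reduce(operator.and_, ms); the [] branch is unreachable in A ('s and …' guards s nonempty)
def pvReduceAnd (ms : List Nat) : Nat :=
  match ms with
  | [] => 0
  | m :: t => t.foldl (· &&& ·) m

def max_subsets (E : List (List Int)) : List (List Int) :=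
  if E.length ≤ 1 then E
  else
    -- 'if not isinstance(E, Sequence)': E is a list here, so the branch never fires
    let incidence := pvIncidence E
    -- incidence[x] never raises KeyError (every element of s was inserted), so getD 0 is exact
    E.filter (fun s => !s.isEmpty && decide (s.length > 2) &&
      pvIsPow2 (pvReduceAnd (s.map (fun x => incidence.getD x 0))))

-- ===== PORT B =====
def max_subsets_alt (E : List (List Int)) : List (List Int) :=
  if E.length ≤ 1 then E
  else
    (PySem.List.enumerate E).filterMap (fun p =>
      if !p.2.isEmpty && decide (p.2.length > 2) &&
          !((PySem.List.enumerate E).any (fun q =>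
            decide (q.1 ≠ p.1) &&
              (PySem.Set.ofList p.2).all (fun x => decide (x ∈ PySem.Set.ofList q.2))))
      then some p.2 else none)

-- ===== PRECONDITION & SPEC =====
def Spec_max_subsets (E : List (List Int)) (out : List (List Int)) : Prop := out = max_subsets_alt E
instance (E : List (List Int)) (out : List (List Int)) : Decidable (Spec_max_subsets E out) := by unfold Spec_max_subsets; infer_instance

-- ===== CLAIM (what is proved, stated in full; the proofs are below) =====
def Claim_equal_max_subsets : Prop := ∀ (E : List (List Int)), Dom_max_subsets E → Spec_max_subsets E (max_subsets E)

-- ===== LEMMAS AND PROOFS =====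

-- one iteration of A's inner loop: the try/except is an or-update of the entry
theorem pvStepOne (d : PySem.Dict Int Nat) (z y : Int) (i : Nat) :
    ((match d.get? z with
      | some v => d.insert z (v ||| (1 <<< i))
      | none   => d.insert z (1 <<< i)).getD y 0)
    = (if y = z then d.getD z 0 ||| (1 <<< i) else d.getD y 0) := by
  rcases h : d.get? z with _ | v
  · simp only [PySem.Dict.getD_insert]
    split_ifs with hy
    · subst hy; rw [PySem.Dict.getD_eq_get?_getD, h]; simp
    · rfl
  · simp only [PySem.Dict.getD_insert]
    split_ifs with hy
    · subst hy; rw [PySem.Dict.getD_eq_get?_getD, h]; rfl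
    · rfl

theorem pvIncStep_testBit (s : List Int) (d : PySem.Dict Int Nat) (i : Nat) (y : Int) (j : Nat) :
    (((pvIncStep i d s).getD y 0).testBit j)
      = ((d.getD y 0).testBit j || (decide (y ∈ s) && decide (j = i))) := by
  induction s generalizing d with
  | nil => simp [pvIncStep]
  | cons z t ih =>
    show (((pvIncStep i _ t).getD y 0).testBit j) = _
    rw [ih, pvStepOne]
    by_cases h : y = z <;> by_cases hj : j = i
    · simp [h, hj, Nat.testBit_or, Nat.one_shiftLeft, Nat.testBit_two_pow]
    · simp [h, hj, Nat.testBit_or, Nat.one_shiftLeft, Nat.testBit_two_pow]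
      exact fun e => absurd e.symm hj
    · simp [h, hj, Nat.testBit_or, Nat.one_shiftLeft, Nat.testBit_two_pow]
    · simp [h, hj, Nat.testBit_or, Nat.one_shiftLeft, Nat.testBit_two_pow]

theorem pvIncFold_testBit (E : List (List Int)) (k : Nat) (d : PySem.Dict Int Nat) (y : Int) (j : Nat) :
    ((((PySem.List.enumerate E (k : Int)).foldl (fun d p => pvIncStep p.1.toNat d p.2) d).getD y 0).testBit j)
      = ((d.getD y 0).testBit j ||
         decide (∃ m : Nat, ∃ _ : m < E.length, j = k + m ∧ y ∈ E[m])) := by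
  induction E generalizing k d with
  | nil => simp [PySem.List.enumerate_nil]
  | cons s t ih =>
    rw [PySem.List.enumerate_cons, List.foldl_cons]
    have h1 : ((k : Int) + 1) = ((k + 1 : Nat) : Int) := by push_cast; ring
    rw [h1, ih]
    simp only [Int.toNat_natCast]
    rw [pvIncStep_testBit]
    cases hb : (d.getD y 0).testBit j <;> simp [hb]
    simp only [← Bool.decide_and, ← Bool.decide_or]
    rw [decide_eq_decide]
    constructor
    · rintro (⟨hy, hj⟩ | ⟨m, hm, hj, hy⟩)
      · exact ⟨0, by omega, by omega, by simpa using hy⟩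
      · exact ⟨m + 1, by omega, by omega, by simpa using hy⟩
    · rintro ⟨m, hm, hj, hy⟩
      cases m with
      | zero => exact Or.inl ⟨by simpa using hy, by omega⟩
      | succ m => exact Or.inr ⟨m, by omega, by omega, by simpa using hy⟩

theorem pvIncidence_testBit (E : List (List Int)) (y : Int) (j : Nat) :
    (((pvIncidence E).getD y 0).testBit j) = decide (∃ _ : j < E.length, y ∈ E[j]) := by
  have h0 : (0 : Int) = ((0 : Nat) : Int) := rfl
  have := pvIncFold_testBit E 0 PySem.Dict.empty y j
  rw [pvIncidence, h0, this]
  simp only [PySem.Dict.getD_empty, Nat.zero_testBit, Bool.false_or]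
  rw [decide_eq_decide]
  constructor
  · rintro ⟨m, hm, hj, hy⟩
    exact ⟨by omega, by simpa [show m = j by omega] using hy⟩
  · rintro ⟨h, hy⟩
    exact ⟨j, h, by omega, hy⟩

theorem pvLandOdd (m : Nat) : ((2*m+1) &&& (2*m)) = 2*m := by
  apply Nat.eq_of_testBit_eq
  intro j
  cases j with
  | zero =>
    rw [Nat.testBit_and]
    simp [Nat.testBit_zero, show (2*m+1)%2 = 1 by omega, show (2*m)%2 = 0 by omega]
  | succ j =>
    rw [Nat.testBit_and]
    simp only [Nat.testBit_succ]
    rw [show (2*m+1)/2 = m by omega, show (2*m)/2 = m by omega]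
    simp

theorem pvLandEven (m : Nat) : ((2*m) &&& (2*m-1)) = 2*(m &&& (m-1)) := by
  apply Nat.eq_of_testBit_eq
  intro j
  cases j with
  | zero =>
    rw [Nat.testBit_and]
    simp [Nat.testBit_zero, show (2*m)%2 = 0 by omega, show (2*(m &&& (m-1)))%2 = 0 by omega]
  | succ j =>
    rw [Nat.testBit_and]
    simp only [Nat.testBit_succ]
    rw [show (2*m)/2 = m by omega, show (2*m-1)/2 = m-1 by omega,
      show (2*(m &&& (m-1)))/2 = m &&& (m-1) by omega, Nat.testBit_and]

theorem pvLandPredZero (n : Nat) (hn : n ≠ 0) : (n &&& (n-1)) = 0 ↔ ∃ k, n = 2^k := by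
  induction n using Nat.strong_induction_on with
  | _ n ih =>
    rcases Nat.even_or_odd n with ⟨m, hm⟩ | ⟨m, hm⟩
    · have hm0 : m ≠ 0 := by omega
      have hmn : m < n := by omega
      rw [show n = 2*m by omega, pvLandEven m]
      rw [show (2*(m &&& (m-1)) = 0) ↔ ((m &&& (m-1)) = 0) by omega, ih m hmn hm0]
      constructor
      · rintro ⟨k, rfl⟩; exact ⟨k+1, by ring⟩
      · rintro ⟨k, hk⟩
        cases k with
        | zero => exfalso; omega
        | succ k =>
          refine ⟨k, ?_⟩
          have h2 : 2^(k+1) = 2*2^k := by ring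
          omega
    · rw [show n = 2*m+1 by omega, show 2*m+1-1 = 2*m by omega, pvLandOdd]
      constructor
      · rintro h
        have hm0 : m = 0 := by omega
        subst hm0
        exact ⟨0, by norm_num⟩
      · rintro ⟨k, hk⟩
        cases k with
        | zero => norm_num at hk; omega
        | succ k =>
          exfalso
          have h2 : 2^(k+1) = 2*2^k := by ring
          omega

theorem pvIsPow2_char (n : Nat) (i : Nat) (hi : n.testBit i = true) :
    (pvIsPow2 n = true ↔ ∀ j, j ≠ i → n.testBit j = false) := by
  have hn : n ≠ 0 := by rintro rfl; simp [Nat.zero_testBit] at hi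
  constructor
  · intro h j hj
    have h0 : (n &&& (n-1)) = 0 := by simpa [pvIsPow2] using h
    obtain ⟨k, rfl⟩ := (pvLandPredZero n hn).mp h0
    have hk : k = i := by simpa [Nat.testBit_two_pow] using hi
    subst hk
    simp [Nat.testBit_two_pow]
    omega
  · intro h
    have hne : n = 2^i := by
      apply Nat.eq_of_testBit_eq
      intro j
      by_cases hj : j = i
      · subst hj; simp [hi, Nat.testBit_two_pow]
      · rw [h j hj]; simp [Nat.testBit_two_pow]; omega
    subst hne
    have h0 : (2^i &&& (2^i - 1)) = 0 := by
      apply Nat.eq_of_testBit_eq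
      intro j
      rw [Nat.testBit_and]
      simp [Nat.testBit_two_pow, Nat.testBit_two_pow_sub_one, Nat.zero_testBit]
      omega
    simpa [pvIsPow2] using h0

theorem foldl_land_testBit (ms : List Nat) (m : Nat) (j : Nat) :
    ((ms.foldl (· &&& ·) m).testBit j) = (m.testBit j && ms.all (fun v => v.testBit j)) := by
  induction ms generalizing m with
  | nil => simp
  | cons a t ih => simp [List.foldl_cons, ih, Nat.testBit_and, Bool.and_assoc]

theorem reduceAnd_testBit (E : List (List Int)) (a : Int) (tl : List Int) (j : Nat) :
    (pvReduceAnd ((a :: tl).map (fun x => (pvIncidence E).getD x 0))).testBit j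
      = decide (∃ _ : j < E.length, ∀ x ∈ (a :: tl), x ∈ E[j]) := by
  rw [List.map_cons]
  show ((tl.map (fun x => (pvIncidence E).getD x 0)).foldl (· &&& ·) ((pvIncidence E).getD a 0)).testBit j = _
  rw [foldl_land_testBit]
  simp only [List.all_map, pvIncidence_testBit]
  by_cases hj : j < E.length
  · simp only [hj, exists_true_left]
    congr 1
    rw [Bool.eq_iff_iff]
    simp [List.all_eq_true, pvIncidence_testBit, hj]
  · simp [pvIncidence_testBit, hj]

-- A's maximality test (the AND of the incidence masks is a single bit) equals B's
-- 'no other member is a superset' scan, for the nonempty member a :: tl at index m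
theorem pow2_eq_notany (E : List (List Int)) (m : Nat) (hm : m < E.length)
    (a : Int) (tl : List Int) (hs : E[m] = a :: tl) :
    pvIsPow2 (pvReduceAnd ((a :: tl).map (fun x => (pvIncidence E).getD x 0)))
      = !((PySem.List.enumerate E).any (fun q =>
            decide (q.1 ≠ (m : Int)) &&
              (PySem.Set.ofList (a :: tl)).all (fun x => decide (x ∈ PySem.Set.ofList q.2)))) := by
  have hbit : (pvReduceAnd ((a :: tl).map (fun x => (pvIncidence E).getD x 0))).testBit m = true := by
    rw [reduceAnd_testBit]
    exact decide_eq_true ⟨hm, fun x hx => hs ▸ hx⟩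
  rw [Bool.eq_iff_iff, pvIsPow2_char _ m hbit]
  have h0 : (0 : Int) = ((0 : Nat) : Int) := rfl
  constructor
  · intro h
    simp only [Bool.not_eq_true', List.any_eq_false]
    rintro q hq
    rw [h0, PySem.List.mem_enumerate_iff] at hq
    obtain ⟨k, hk, rfl⟩ := hq
    by_cases hkm : k = m
    · simp [hkm]
    · have := h k hkm
      rw [reduceAnd_testBit] at this
      simp only [decide_eq_false_iff_not] at this
      simp only [Bool.and_eq_true, decide_eq_true_eq, List.all_eq_true,
        PySem.Set.mem_ofList, not_and]
      intro _ hall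
      exact this ⟨hk, fun x hx => hall x (by simpa [PySem.Set.mem_ofList] using hx)⟩
  · intro h j hjm
    simp only [Bool.not_eq_true', List.any_eq_false] at h
    rw [reduceAnd_testBit]
    simp only [decide_eq_false_iff_not]
    rintro ⟨hj, hsub⟩
    have := h (((j : Nat) : Int), E[j]) (by
      rw [h0, PySem.List.mem_enumerate_iff]
      exact ⟨j, hj, by simp⟩)
    simp only [Bool.and_eq_true, decide_eq_true_eq, List.all_eq_true,
      PySem.Set.mem_ofList, not_and] at this
    exact this (by exact_mod_cast hjm) (fun x hx => hsub x hx)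

-- B's enumerate-filterMap equals A's filter when the predicates agree pointwise on the enumeration
theorem filterMap_enumerate_eq_filter {α : Type} (l : List α) (k : Int)
    (P : α → Bool) (Q : Int × α → Bool)
    (h : ∀ p ∈ PySem.List.enumerate l k, Q p = P p.2) :
    (PySem.List.enumerate l k).filterMap (fun p => if Q p then some p.2 else none) = l.filter P := by
  induction l generalizing k with
  | nil => simp [PySem.List.enumerate_nil]
  | cons x t ih =>
    rw [PySem.List.enumerate_cons, List.filterMap_cons]
    have hx : Q (k, x) = P x := h _ (by rw [PySem.List.enumerate_cons]; exact .head _)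
    have ht := ih (k+1) (fun p hp => h p (by rw [PySem.List.enumerate_cons]; exact .tail _ hp))
    cases hP : P x <;> simp [hx, hP, List.filter_cons, ht]

-- ===== VERDICT (by name: the statement is the Claim_ definition above) =====
theorem max_subsets_spec : Claim_equal_max_subsets := by
  intro E _
  show max_subsets E = max_subsets_alt E
  unfold max_subsets max_subsets_alt
  by_cases hlen : E.length ≤ 1
  · simp [hlen]
  · simp only [hlen, if_false]
    symm
    apply filterMap_enumerate_eq_filter
    rintro p hp
    rw [show (0:Int) = ((0:Nat):Int) from rfl, PySem.List.mem_enumerate_iff] at hp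
    obtain ⟨m, hm, rfl⟩ := hp
    simp only [zero_add, Nat.cast_zero]
    rcases hsE : E[m] with _ | ⟨a, tl⟩
    · simp [hsE]
    · congr 1
      exact (pow2_eq_notany E m hm a tl hsE).symm
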